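-- pv_equiv track=rewrite | github.com/Hacker-Ring-2/127.0.0.1 | src/ai/tools/advanced_financial_analyzer.py | _calculate_overall_bias
-- ===== SOURCE A (Python) =====
-- from typing import Dict, List, Any, Optional, Union, Tuple
--
-- def _calculate_overall_bias(signals: List[Dict]) -> str:
--     """Calculate overall market bias from signals"""
--     if not signals:
--         return 'neutral'
--
--     buy_signals = sum(1 for s in signals if s['type'] == 'BUY')
--     sell_signals = sum(1 for s in signals if s['type'] == 'SELL')
--
--     if buy_signals > sell_signals:
--         return 'bullish'
--     elif sell_signals > buy_signals:
--         return 'bearish'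
--     else:
--         return 'neutral'
-- ===== SOURCE B (Python) =====
-- def _calculate_overall_bias(signals):
--     """Calculate overall market bias from signals (single signed-balance pass)"""
--     balance = 0
--     for s in signals:
--         t = s['type']
--         if t == 'BUY':
--             balance += 1
--         elif t == 'SELL':
--             balance -= 1
--     if balance > 0:
--         return 'bullish'
--     elif balance < 0:
--         return 'bearish'
--     else:
--         return 'neutral'
-- ===== Notes on version B (the rewrite author's own statement) =====
-- stated objective: alternative
-- what changed: Replaces two independent counting passes plus a count comparison by one pass maintaining a single signed balance (+1 per BUY, -1 per SELL) compared to zero, with no special empty-list guard.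
import Mathlib
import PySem

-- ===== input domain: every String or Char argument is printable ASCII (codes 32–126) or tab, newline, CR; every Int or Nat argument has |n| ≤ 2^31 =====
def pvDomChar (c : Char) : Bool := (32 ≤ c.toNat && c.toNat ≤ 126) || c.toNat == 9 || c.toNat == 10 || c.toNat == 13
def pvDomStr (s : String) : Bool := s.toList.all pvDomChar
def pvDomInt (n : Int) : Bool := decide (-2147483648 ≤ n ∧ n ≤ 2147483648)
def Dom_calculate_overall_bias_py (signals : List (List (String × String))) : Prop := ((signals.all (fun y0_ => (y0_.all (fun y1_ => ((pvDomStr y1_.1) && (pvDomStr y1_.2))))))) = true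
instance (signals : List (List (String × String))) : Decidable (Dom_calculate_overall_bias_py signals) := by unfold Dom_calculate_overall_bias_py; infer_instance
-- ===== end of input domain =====

-- B replaces A's two counting passes and count comparison by one pass keeping a single signed balance compared to zero.

-- ===== PORT A =====
-- two 0/1-sums over the signals, then compare the two counts
def calculate_overall_bias_py (signals : List (List (String × String))) : String :=
  if signals = [] then "neutral"
  else
    let buy_signals : Int :=
      (signals.map (fun s => if List.lookup "type" s = some "BUY" then (1 : Int) else 0)).sum
    let sell_signals : Int :=
      (signals.map (fun s => if List.lookup "type" s = some "SELL" then (1 : Int) else 0)).sum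
    if buy_signals > sell_signals then "bullish"
    else if sell_signals > buy_signals then "bearish"
    else "neutral"

-- ===== PORT B =====
-- one fold maintaining a signed balance: +1 per BUY, -1 per SELL
def calculate_overall_bias_py_alt (signals : List (List (String × String))) : String :=
  let balance : Int := signals.foldl (fun b s =>
    let t := List.lookup "type" s
    if t = some "BUY" then b + 1
    else if t = some "SELL" then b - 1
    else b) 0
  if balance > 0 then "bullish"
  else if balance < 0 then "bearish"
  else "neutral"

-- ===== PRECONDITION & SPEC =====
-- Pre_ excludes exactly the inputs where s['type'] raises KeyError in both Pythons (a signal dict with no 'type' key).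
def Pre_calculate_overall_bias_py (signals : List (List (String × String))) : Prop :=
  ∀ s ∈ signals, (List.lookup "type" s).isSome
instance (signals : List (List (String × String))) : Decidable (Pre_calculate_overall_bias_py signals) := by unfold Pre_calculate_overall_bias_py; infer_instance
def pvWitness_calculate_overall_bias_py : (List (List (String × String))) :=
  [[("type", "BUY")], [("type", "SELL")], [("type", "HOLD")]]
def Spec_calculate_overall_bias_py (signals : List (List (String × String))) (out : String) : Prop := out = calculate_overall_bias_py_alt signals
instance (signals : List (List (String × String))) (out : String) : Decidable (Spec_calculate_overall_bias_py signals out) := by unfold Spec_calculate_overall_bias_py; infer_instance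

-- ===== CLAIM (what is proved, stated in full; the proofs are below) =====
def Claim_equal_calculate_overall_bias_py : Prop := ∀ (signals : List (List (String × String))), Dom_calculate_overall_bias_py signals → Pre_calculate_overall_bias_py signals → Spec_calculate_overall_bias_py signals (calculate_overall_bias_py signals)

-- ===== LEMMAS AND PROOFS =====
-- the balance fold computes acc + (#BUY − #SELL)
lemma balance_eq (signals : List (List (String × String))) : ∀ (acc : Int),
    signals.foldl (fun b s =>
      let t := List.lookup "type" s
      if t = some "BUY" then b + 1
      else if t = some "SELL" then b - 1
      else b) acc
    = acc
      + (signals.map (fun s => if List.lookup "type" s = some "BUY" then (1 : Int) else 0)).sum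
      - (signals.map (fun s => if List.lookup "type" s = some "SELL" then (1 : Int) else 0)).sum := by
  induction signals with
  | nil => simp
  | cons s rest ih =>
    intro acc
    simp only [List.foldl_cons, List.map_cons, List.sum_cons, ih]
    split_ifs <;> simp_all <;> ring

lemma compare_eq (buy sell : Int) :
    ((if buy > sell then "bullish" else if sell > buy then "bearish" else "neutral") : String)
    = (if 0 + buy - sell > 0 then "bullish" else if 0 + buy - sell < 0 then "bearish" else "neutral") := by
  split_ifs <;> first | rfl | omega

-- ===== VERDICT (by name: the statement is the Claim_ definition above) =====
theorem calculate_overall_bias_py_spec : Claim_equal_calculate_overall_bias_py := by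
  intro signals _ _
  unfold Spec_calculate_overall_bias_py calculate_overall_bias_py calculate_overall_bias_py_alt
  cases signals with
  | nil => decide
  | cons s rest =>
    simp only [balance_eq]
    rw [if_neg (List.cons_ne_nil s rest)]
    exact compare_eq _ _
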